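-- pv_equiv track=rewrite | github.com/dalozedidier-dot/SOST-Framework- | scripts/ci_band_suite.py | pick_best_flag
-- ===== SOURCE A (Python) =====
-- from typing import List, Optional
--
-- def pick_best_flag(flags: List[str], keywords: List[str]) -> Optional[str]:
--     # score simple basé sur mots-clés
--     best = None
--     best_score = -1
--     for flg in flags:
--         low = flg.lower()
--         score = 0
--         for kw in keywords:
--             if kw in low:
--                 score += 1
--         if score > best_score:
--             best_score = score
--             best = flg
--     return best if best_score > 0 else None
-- ===== SOURCE B (Python) =====
-- from typing import List, Optional
--
-- def pick_best_flag(flags: List[str], keywords: List[str]) -> Optional[str]: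
--     # keyword-major: build a full score table first, then pick the first
--     # flag reaching the positive maximum in a separate selection pass
--     lows = [f.lower() for f in flags]
--     scores = [0] * len(flags)
--     for kw in keywords:
--         scores = [s + (kw in low) for low, s in zip(lows, scores)]
--     best, best_score = None, 0
--     for f, s in zip(flags, scores):
--         if s > best_score:
--             best, best_score = f, s
--     return best
-- ===== Notes on version B (the rewrite author's own statement) =====
-- stated objective: alternative
-- what changed: Inverted the loop nesting to keyword-major: B builds a full score table (one lowercase pass, then one update pass per keyword) and then picks the first flag reaching the positive maximum in a separate selection pass, instead of A's flag-major single pass with a running best.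
import Mathlib
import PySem

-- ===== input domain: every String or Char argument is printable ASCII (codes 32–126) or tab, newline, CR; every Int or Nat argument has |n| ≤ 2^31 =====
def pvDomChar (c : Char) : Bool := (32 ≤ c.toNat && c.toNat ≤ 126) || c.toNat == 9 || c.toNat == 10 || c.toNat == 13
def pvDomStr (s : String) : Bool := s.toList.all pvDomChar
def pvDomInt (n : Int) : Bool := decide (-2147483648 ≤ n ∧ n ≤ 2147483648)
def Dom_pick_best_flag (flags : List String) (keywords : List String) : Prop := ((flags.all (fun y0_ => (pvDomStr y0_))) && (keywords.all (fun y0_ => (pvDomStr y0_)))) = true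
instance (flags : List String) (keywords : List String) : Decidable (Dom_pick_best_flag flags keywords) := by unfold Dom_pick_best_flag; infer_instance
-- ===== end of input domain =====

-- B re-implements pick_best_flag keyword-major (full score table, then a separate
-- selection pass) instead of A's flag-major single pass; alternative decomposition, same cost.

-- ===== PORT A =====
-- A: flag-major single pass keeping a running (best, best_score)
def pick_best_flag (flags : List String) (keywords : List String) : Option String :=
  let st := flags.foldl (fun (st : Option String × Int) flg =>
      let low := PySem.Str.lower flg
      let score := keywords.foldl (fun s kw => if PySem.Str.isIn kw low then s + 1 else s) (0 : Int)
      if score > st.2 then (some flg, score) else st)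
    (none, -1)
  if st.2 > 0 then st.1 else none

-- ===== PORT B =====
-- B: keyword-major score table, then a separate selection pass
def pick_best_flag_alt (flags : List String) (keywords : List String) : Option String :=
  let lows := flags.map PySem.Str.lower
  let scores := keywords.foldl
      (fun (sc : List Int) kw =>
        (lows.zip sc).map (fun p => p.2 + (if PySem.Str.isIn kw p.1 then 1 else 0)))
      (List.replicate flags.length 0)
  let sel := (flags.zip scores).foldl
      (fun (st : Option String × Int) p => if p.2 > st.2 then (some p.1, p.2) else st)
      (none, 0)
  sel.1

-- ===== PRECONDITION & SPEC =====
def Spec_pick_best_flag (flags : List String) (keywords : List String) (out : Option String) : Prop := out = pick_best_flag_alt flags keywords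
instance (flags : List String) (keywords : List String) (out : Option String) : Decidable (Spec_pick_best_flag flags keywords out) := by unfold Spec_pick_best_flag; infer_instance

-- ===== CLAIM (what is proved, stated in full; the proofs are below) =====
def Claim_equal_pick_best_flag : Prop := ∀ (flags : List String) (keywords : List String), Dom_pick_best_flag flags keywords → Spec_pick_best_flag flags keywords (pick_best_flag flags keywords)

-- ===== LEMMAS AND PROOFS =====

-- zipping a list with a map of itself is a map of pairs
lemma zip_self_map (lows : List String) (g : String → Int) :
    lows.zip (lows.map g) = lows.map (fun l => (l, g l)) := by
  induction lows with
  | nil => rfl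
  | cons l t ih => simp [ih]

-- B's table fold computes, flag-wise, the keyword count
lemma table_fold (kws : List String) (lows : List String) (g : String → Int) :
    kws.foldl
      (fun (sc : List Int) kw =>
        (lows.zip sc).map (fun p => p.2 + (if PySem.Str.isIn kw p.1 then 1 else 0)))
      (lows.map g)
    = lows.map (fun l => g l + (kws.countP (fun kw => PySem.Str.isIn kw l) : Int)) := by
  induction kws generalizing g with
  | nil => simp
  | cons kw kws ih =>
      simp only [List.foldl_cons]
      rw [zip_self_map, List.map_map]
      rw [show ((fun (p : String × Int) => p.2 + (if PySem.Str.isIn kw p.1 then 1 else 0)) ∘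
            fun l => (l, g l)) = fun l => g l + (if PySem.Str.isIn kw l then 1 else 0) from rfl]
      rw [ih]
      apply List.map_congr_left
      intro l _
      simp [List.countP_cons]; split_ifs <;> ring

-- the two selection loops agree under the stated invariant
lemma sel_loop (c : String → Int) (hc : ∀ f, 0 ≤ c f) :
    ∀ (fl : List String) (a b : Option String) (sa sb : Int),
      sb = max sa 0 → (0 < sa → b = a ∧ sb = sa) → (sa ≤ 0 → b = none) →
      (if (fl.foldl (fun st f => if c f > st.2 then (some f, c f) else st) (a, sa)).2 > 0
       then (fl.foldl (fun st f => if c f > st.2 then (some f, c f) else st) (a, sa)).1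
       else none)
      = (fl.foldl (fun st f => if c f > st.2 then (some f, c f) else st) (b, sb)).1 := by
  intro fl
  induction fl with
  | nil =>
      intro a b sa sb h1 h2 h3
      by_cases h : 0 < sa
      · simp only [List.foldl_nil]
        rcases h2 h with ⟨hb, _⟩
        simp [h, hb]
      · simp only [List.foldl_nil]
        simp [show ¬ sa > 0 from h, (h3 (by omega)).symm]
  | cons f fl ih =>
      intro a b sa sb h1 h2 h3
      simp only [List.foldl_cons]
      have hcf := hc f
      by_cases hA : c f > sa
      · by_cases hB : c f > sb
        · simp only [hA, hB, if_pos]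
          exact ih (some f) (some f) (c f) (c f) (by omega) (fun _ => ⟨rfl, rfl⟩)
            (fun h0 => by omega)
        · have hcf0 : c f = 0 := by omega
          simp only [hA, hB, if_pos]
          exact ih (some f) b (c f) sb (by omega)
            (fun h0 => by omega) (fun _ => h3 (by omega))
      · have hB : ¬ c f > sb := by
          by_cases h0 : 0 < sa
          · rcases h2 h0 with ⟨_, h⟩; omega
          · omega
        simp only [hA, hB]
        exact ih a b sa sb h1 h2 h3

lemma pick_best_flag_eq_alt (flags keywords : List String) :
    pick_best_flag flags keywords = pick_best_flag_alt flags keywords := by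
  simp only [pick_best_flag, pick_best_flag_alt]
  set c : String → Int :=
    fun f => (keywords.countP (fun kw => PySem.Str.isIn kw (PySem.Str.lower f)) : Int) with hc
  have hscore : ∀ f : String,
      keywords.foldl (fun s kw => if PySem.Str.isIn kw (PySem.Str.lower f) then s + 1 else s) (0 : Int)
      = c f := by
    intro f
    rw [PySem.List.foldl_if_add_one]; simp [hc]
  -- normalize B
  have hrep : (List.replicate flags.length (0 : Int))
      = (flags.map PySem.Str.lower).map (fun _ => (0 : Int)) := by
    induction flags with
    | nil => rfl
    | cons f t ih => simp only [List.map_cons, List.length_cons, List.replicate_succ, ih]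
  rw [hrep, table_fold, List.map_map, zip_self_map, List.foldl_map]
  -- normalize A
  have hstep : (fun (st : Option String × Int) flg =>
      if (keywords.foldl (fun s kw => if PySem.Str.isIn kw (PySem.Str.lower flg) then s + 1 else s)
          (0 : Int)) > st.2
      then (some flg,
        keywords.foldl (fun s kw => if PySem.Str.isIn kw (PySem.Str.lower flg) then s + 1 else s)
          (0 : Int))
      else st)
      = (fun (st : Option String × Int) f => if c f > st.2 then (some f, c f) else st) := by
    funext st flg
    rw [hscore]
  rw [hstep]
  have := sel_loop c (fun f => by simp [hc]) flags none none (-1) 0 (by omega)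
    (by omega) (fun _ => rfl)
  simpa [hc] using this

-- ===== VERDICT (by name: the statement is the Claim_ definition above) =====
theorem pick_best_flag_spec : Claim_equal_pick_best_flag := by
  intro flags keywords _
  unfold Spec_pick_best_flag
  exact pick_best_flag_eq_alt flags keywords
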